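-- pv_equiv track=rewrite | github.com/aorursy/KT_dataset_py | chittiprolu_learn-python-challenge-day-5-exercises.py | has_lucky_number
-- ===== SOURCE A (Python) =====
-- def has_lucky_number(nums):
--     """Return whether the given list of numbers is lucky. A lucky list contains
--     at least one number divisible by 7.
--     """
--     a=[]
--     for num in nums:
--         if num%7==0:
--             a.append(True)
--         else:
--             a.append(False)
--     if True in a:
--         return True
--     else:
--         return False
-- ===== SOURCE B (Python) =====
-- def has_lucky_number(nums):
--     """Return whether the given list of numbers is lucky. A lucky list contains
--     at least one number divisible by 7.
--     """
--     smallest = 1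
--     for num in nums:
--         r = num % 7
--         if r < smallest:
--             smallest = r
--     return smallest == 0
-- ===== Notes on version B (the rewrite author's own statement) =====
-- stated objective: alternative
-- what changed: B replaces A's two staged passes (build a full boolean list, then scan it for True) with a single numeric min-reduction: it tracks the smallest residue mod 7 seen (residues are in 0..6) and reports lucky iff that minimum is 0, maintaining an integer accumulator instead of any boolean list or per-element truth values.
import Mathlib
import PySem

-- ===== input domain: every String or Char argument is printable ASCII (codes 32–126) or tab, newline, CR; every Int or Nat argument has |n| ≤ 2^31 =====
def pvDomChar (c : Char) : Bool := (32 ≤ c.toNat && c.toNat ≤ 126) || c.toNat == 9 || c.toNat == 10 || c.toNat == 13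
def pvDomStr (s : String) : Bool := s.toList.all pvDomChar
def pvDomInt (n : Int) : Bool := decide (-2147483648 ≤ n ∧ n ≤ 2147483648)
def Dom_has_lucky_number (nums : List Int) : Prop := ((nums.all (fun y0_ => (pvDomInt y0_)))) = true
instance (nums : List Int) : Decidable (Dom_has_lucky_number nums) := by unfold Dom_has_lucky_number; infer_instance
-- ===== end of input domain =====

-- B replaces A's boolean-list build + membership scan with a single numeric min-reduction of the residues mod 7 (lucky iff the minimum residue is 0).
-- ===== PORT A =====
-- A: build a boolean list with a loop, then test membership of true.
def has_lucky_number (nums : List Int) : Bool :=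
  let a := nums.foldl (fun acc num =>
    if PySem.Int.mod num 7 == 0 then acc ++ [true] else acc ++ [false]) []
  if a.contains true then true else false

-- ===== PORT B =====
-- B: track the smallest residue mod 7 seen (start 1); lucky iff it is 0.
def has_lucky_number_alt (nums : List Int) : Bool :=
  let smallest := nums.foldl (fun s num =>
    let r := PySem.Int.mod num 7
    if r < s then r else s) 1
  smallest == 0

-- ===== PRECONDITION & SPEC =====
def Spec_has_lucky_number (nums : List Int) (out : Bool) : Prop := out = has_lucky_number_alt nums
instance (nums : List Int) (out : Bool) : Decidable (Spec_has_lucky_number nums out) := by unfold Spec_has_lucky_number; infer_instance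

-- ===== CLAIM =====
def Claim_equal_has_lucky_number : Prop := ∀ (nums : List Int), Dom_has_lucky_number nums → Spec_has_lucky_number nums (has_lucky_number nums)

-- ===== LEMMAS AND PROOFS =====
theorem foldl_bools (f : Int → Bool) (nums : List Int) (acc : List Bool) :
    (nums.foldl (fun acc num =>
      if f num then acc ++ [true] else acc ++ [false]) acc).contains true
    = (acc.contains true || nums.any f) := by
  induction nums generalizing acc with
  | nil => simp
  | cons x xs ih =>
    simp only [List.foldl_cons, List.any_cons]
    by_cases h : f x
    · rw [if_pos h, ih]; simp [h]
    · rw [if_neg h, ih]; simp [h]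

theorem foldl_min_res (nums : List Int) (acc : Int) (hacc : 0 ≤ acc) :
    ((nums.foldl (fun s num =>
      let r := PySem.Int.mod num 7
      if r < s then r else s) acc) == 0)
    = (acc == 0 || nums.any (fun num => PySem.Int.mod num 7 == 0)) := by
  induction nums generalizing acc with
  | nil => simp
  | cons x xs ih =>
    simp only [List.foldl_cons, List.any_cons]
    have hr : 0 ≤ PySem.Int.mod x 7 := PySem.Int.mod_nonneg x (by norm_num)
    by_cases h : PySem.Int.mod x 7 < acc
    · rw [if_pos h, ih _ hr]
      by_cases hz : PySem.Int.mod x 7 = 0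
      · have hp : (PySem.Int.mod x 7 == 0) = true := beq_iff_eq.mpr hz
        rw [hp]; simp only [Bool.true_or, Bool.or_true]
      · have hp : (PySem.Int.mod x 7 == 0) = false := by simpa using hz
        have hq : (acc == 0) = false := by
          have : acc ≠ 0 := by omega
          simpa using this
        rw [hp, hq]; simp only [Bool.false_or]
    · rw [if_neg h, ih _ hacc]
      by_cases hz : acc = 0
      · have hq : (acc == 0) = true := beq_iff_eq.mpr hz
        rw [hq]; simp only [Bool.true_or]
      · have hq : (acc == 0) = false := by simpa using hz
        have hp : (PySem.Int.mod x 7 == 0) = false := by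
          have : PySem.Int.mod x 7 ≠ 0 := by omega
          simpa using this
        rw [hq, hp]; simp only [Bool.false_or]

-- ===== VERDICT =====
theorem has_lucky_number_spec : Claim_equal_has_lucky_number := by
  intro nums _
  unfold Spec_has_lucky_number has_lucky_number has_lucky_number_alt
  simp only [foldl_bools, foldl_min_res nums 1 (by norm_num)]
  cases h : nums.any (fun num => PySem.Int.mod num 7 == 0) <;> simp [h]
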